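-- pv_equiv track=rewrite | github.com/dotrosedotnet/tic-tac-toe-for-recurse-center | windows/window_test.py | grid_maker
-- ===== SOURCE A (Python) =====
-- def grid_maker(grid_side_length):
--     """
--     takes in grid_side_length and outputs grid in a multiline string
--     grid rows have a height of two, and then add one height bottom
--     columns have width of four, and then add right side
--     """
--     char_rows = []
--     text_rows = []
--     grid_string = """"""
--     # print first column to each row
--     while len(char_rows) < grid_side_length * 2 + 1:
--         char_rows.append([])
--     for i, row in enumerate(char_rows):
--         if i == 0:
--             row.append("┌")
--         elif i == grid_side_length * 2:
--             row.append("└")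
--         elif i % 2 == 0:
--             row.append("├")
--         else:
--             row.append("│")
--     # print following columns for each grid_side_length until last
--     for n in range(grid_side_length * 2):
--         if n == grid_side_length * 2 - 1:  # magic number '1' needs explanation
--             for i, row in enumerate(char_rows):
--                 if i == 0:
--                     row.append("┐")
--                 elif i == grid_side_length * 2:
--                     row.append("┘")
--                 elif i % 2 == 0:
--                     row.append("┤")
--                 else:
--                     row.append("│")
--         if n % 2 == 0:
--             for i, row in enumerate(char_rows):
--                 if i % 2 == 0:
--                     row.append("───")
--                 else:
--                     row.append("   ")
--             for i, row in enumerate(char_rows):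
--                 if n != grid_side_length * 2 - 2:  # magic number '2' needs explanation
--                     if i == 0:
--                         row.append("┬")
--                     elif i == grid_side_length * 2:
--                         row.append("┴")
--                     elif i % 2 == 0:
--                         row.append("┼")
--                     else:
--                         row.append("│")
--     for row in char_rows:
--         text_rows.append("".join(row))
--     grid_string = "\n".join(text_rows)
--     return grid_string
-- ===== SOURCE B (Python) =====
-- def grid_maker(grid_side_length):
--     """
--     takes in grid_side_length and outputs grid in a multiline string
--     grid rows have a height of two, and then add one height bottom
--     columns have width of four, and then add right side
--     """
--     n = grid_side_length
--
--     def border(left, junction, right):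
--         if n == 0:
--             return left
--         return left + "\u2500\u2500\u2500" + (junction + "\u2500\u2500\u2500") * (n - 1) + right
--
--     lines = []
--     for i in range(2 * n + 1):
--         if i % 2 == 1:
--             lines.append("\u2502" + "   \u2502" * n)
--         elif i == 0:
--             lines.append(border("\u250c", "\u252c", "\u2510"))
--         elif i == 2 * n:
--             lines.append(border("\u2514", "\u2534", "\u2518"))
--         else:
--             lines.append(border("\u251c", "\u253c", "\u2524"))
--     return "\n".join(lines)
-- ===== Notes on version B (the rewrite author's own statement) =====
-- stated objective: simpler
-- what changed: B builds the grid row by row with closed-form line strings (border via string repetition, content via ' |'*n) joined at the end, instead of A's column-by-column construction that mutates a list of char-rows across three enumerate passes per column.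
import Mathlib
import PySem

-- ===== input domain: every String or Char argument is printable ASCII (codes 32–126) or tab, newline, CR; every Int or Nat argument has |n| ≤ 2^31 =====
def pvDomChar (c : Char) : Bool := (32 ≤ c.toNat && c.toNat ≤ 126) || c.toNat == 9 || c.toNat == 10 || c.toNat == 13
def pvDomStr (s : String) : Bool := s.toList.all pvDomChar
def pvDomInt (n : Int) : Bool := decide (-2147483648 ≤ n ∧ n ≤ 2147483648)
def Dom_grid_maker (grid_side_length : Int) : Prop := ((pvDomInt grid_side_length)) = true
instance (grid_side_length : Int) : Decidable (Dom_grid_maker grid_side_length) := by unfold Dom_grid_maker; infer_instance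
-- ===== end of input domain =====

-- B builds the grid row by row from closed-form line strings instead of A's column-by-column
-- mutation of a list of char-rows; equivalence of the return values is proved for every Int input.

-- ===== PORT A =====
-- first-column loop body: 'if i == 0 … elif i == g*2 … elif i % 2 == 0 … else …' appending one char
def pvFirstCol (g : Int) (i : Int) (row : List String) : List String :=
  if i = 0 then row ++ ["┌"]
  else if i = g * 2 then row ++ ["└"]
  else if PySem.Int.mod i 2 = 0 then row ++ ["├"]
  else row ++ ["│"]

-- right-column loop body (the n == g*2 - 1 pass)
def pvRightCol (g : Int) (i : Int) (row : List String) : List String :=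
  if i = 0 then row ++ ["┐"]
  else if i = g * 2 then row ++ ["┘"]
  else if PySem.Int.mod i 2 = 0 then row ++ ["┤"]
  else row ++ ["│"]

-- junction loop body (the 'if n != g*2 - 2' pass)
def pvJunction (g : Int) (i : Int) (row : List String) : List String :=
  if i = 0 then row ++ ["┬"]
  else if i = g * 2 then row ++ ["┴"]
  else if PySem.Int.mod i 2 = 0 then row ++ ["┼"]
  else row ++ ["│"]

-- body of 'for n in range(grid_side_length * 2)': up to three enumerate passes over char_rows
def pvStep (g : Int) (rows : List (List String)) (k : Int) : List (List String) :=
  let rows :=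
    if k = g * 2 - 1 then
      (PySem.List.enumerate rows 0).map (fun p => pvRightCol g p.1 p.2)
    else rows
  if PySem.Int.mod k 2 = 0 then
    let rows := (PySem.List.enumerate rows 0).map
      (fun p => if PySem.Int.mod p.1 2 = 0 then p.2 ++ ["───"] else p.2 ++ ["   "])
    (PySem.List.enumerate rows 0).map
      (fun p => if k ≠ g * 2 - 2 then pvJunction g p.1 p.2 else p.2)
  else rows

def grid_maker (grid_side_length : Int) : String :=
  -- 'while len(char_rows) < grid_side_length * 2 + 1: char_rows.append([])'
  let char_rows : List (List String) := List.replicate (grid_side_length * 2 + 1).toNat []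
  let char_rows := (PySem.List.enumerate char_rows 0).map
    (fun p => pvFirstCol grid_side_length p.1 p.2)
  let char_rows := (PySem.List.pyRange 0 (grid_side_length * 2) 1).foldl
    (pvStep grid_side_length) char_rows
  let text_rows := char_rows.map (fun row => PySem.Str.join "" row)
  PySem.Str.join "\n" text_rows

-- ===== PORT B =====
-- Python string repetition s * k (k ≥ 0)
def pvRepeat (s : String) : Nat → String
  | 0 => ""
  | k + 1 => s ++ pvRepeat s k

-- Source B's border(left, junction, right) helper (closed over n)
def pvBorder (n : Int) (left junction right : String) : String :=
  if n = 0 then left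
  else left ++ "───" ++ pvRepeat (junction ++ "───") (n - 1).toNat ++ right

-- body of Source B's 'for i in range(2 * n + 1)' loop: the line for index i
def pvLine (n : Int) (i : Int) : String :=
  if PySem.Int.mod i 2 = 1 then "│" ++ pvRepeat "   │" n.toNat
  else if i = 0 then pvBorder n "┌" "┬" "┐"
  else if i = 2 * n then pvBorder n "└" "┴" "┘"
  else pvBorder n "├" "┼" "┤"

def grid_maker_alt (grid_side_length : Int) : String :=
  let lines := (PySem.List.pyRange 0 (2 * grid_side_length + 1) 1).foldl
    (fun acc i => acc ++ [pvLine grid_side_length i]) []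
  PySem.Str.join "\n" lines

-- ===== PRECONDITION & SPEC =====
def Spec_grid_maker (grid_side_length : Int) (out : String) : Prop := out = grid_maker_alt grid_side_length
instance (grid_side_length : Int) (out : String) : Decidable (Spec_grid_maker grid_side_length out) := by unfold Spec_grid_maker; infer_instance

-- ===== CLAIM (what is proved, stated in full; the proofs are below) =====
def Claim_equal_grid_maker : Prop := ∀ (grid_side_length : Int), Dom_grid_maker grid_side_length → Spec_grid_maker grid_side_length (grid_maker grid_side_length)

-- ===== LEMMAS AND PROOFS =====

-- per-row form of pvStep
def pvRowStep (g : Int) (i : Int) (row : List String) (k : Int) : List String :=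
  let row := if k = g * 2 - 1 then pvRightCol g i row else row
  if PySem.Int.mod k 2 = 0 then
    let row := if PySem.Int.mod i 2 = 0 then row ++ ["───"] else row ++ ["   "]
    if k ≠ g * 2 - 2 then pvJunction g i row else row
  else row

-- the characters row i carries, as functions of the row index
def pvLeftChar (g : Int) (i : Int) : String :=
  if i = 0 then "┌" else if i = g * 2 then "└" else if PySem.Int.mod i 2 = 0 then "├" else "│"
def pvRightChar (g : Int) (i : Int) : String :=
  if i = 0 then "┐" else if i = g * 2 then "┘" else if PySem.Int.mod i 2 = 0 then "┤" else "│"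
def pvJuncChar (g : Int) (i : Int) : String :=
  if i = 0 then "┬" else if i = g * 2 then "┴" else if PySem.Int.mod i 2 = 0 then "┼" else "│"
def pvPiece (i : Int) : String := if PySem.Int.mod i 2 = 0 then "───" else "   "

-- the tail a row accumulates for the last d cells
def pvSfx (piece junc right : String) : Nat → List String
  | 0 => []
  | 1 => [piece, right]
  | d + 2 => piece :: junc :: pvSfx piece junc right (d + 1)

theorem pvFirstCol_eq (g i : Int) (row : List String) :
    pvFirstCol g i row = row ++ [pvLeftChar g i] := by
  unfold pvFirstCol pvLeftChar; split_ifs <;> rfl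

theorem pvRightCol_eq (g i : Int) (row : List String) :
    pvRightCol g i row = row ++ [pvRightChar g i] := by
  unfold pvRightCol pvRightChar; split_ifs <;> rfl

theorem pvJunction_eq (g i : Int) (row : List String) :
    pvJunction g i row = row ++ [pvJuncChar g i] := by
  unfold pvJunction pvJuncChar; split_ifs <;> rfl

-- enumerate of an index-preserving map keeps the indices
theorem enum_map {β γ : Type} (F : Int → β → γ) :
    ∀ (xs : List β) (s : Int),
      PySem.List.enumerate ((PySem.List.enumerate xs s).map (fun p => F p.1 p.2)) s
        = (PySem.List.enumerate xs s).map (fun p => (p.1, F p.1 p.2)) := by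
  intro xs
  induction xs with
  | nil => intro s; rfl
  | cons x t ih => intro s; simp [PySem.List.enumerate_cons, ih]

-- a fold of per-row enumerate-maps is the enumerate-map of per-row folds
theorem foldl_enum_map {β : Type} (u : Int → β → Int → β) :
    ∀ (l : List Int) (xs : List β) (s : Int),
      l.foldl (fun rs k => (PySem.List.enumerate rs s).map (fun p => u p.1 p.2 k)) xs
        = (PySem.List.enumerate xs s).map (fun p => l.foldl (u p.1) p.2) := by
  intro l
  induction l with
  | nil => intro xs s; simp
  | cons k t ih =>
      intro xs s
      rw [List.foldl_cons, ih, enum_map (fun i b => u i b k), List.map_map]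
      rfl

-- pvStep acts on each row independently, as pvRowStep
-- composing two enumerate-map passes
theorem map_enum_map {β γ δ : Type} (F : Int → β → γ) (G : Int → γ → δ)
    (xs : List β) (s : Int) :
    (PySem.List.enumerate ((PySem.List.enumerate xs s).map (fun p => F p.1 p.2)) s).map
        (fun p => G p.1 p.2)
      = (PySem.List.enumerate xs s).map (fun p => G p.1 (F p.1 p.2)) := by
  rw [enum_map, List.map_map]
  rfl

-- pvStep acts on each row independently, as pvRowStep
theorem pvStep_eq (g : Int) (rows : List (List String)) (k : Int) :
    pvStep g rows k = (PySem.List.enumerate rows 0).map (fun p => pvRowStep g p.1 p.2 k) := by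
  unfold pvStep pvRowStep
  by_cases h1 : k = g * 2 - 1
  · subst h1
    by_cases h2 : PySem.Int.mod (g * 2 - 1) 2 = 0
    · simp only [h2, if_true]
      rw [map_enum_map (fun i r => pvRightCol g i r)
          (fun i r => if PySem.Int.mod i 2 = 0 then r ++ ["───"] else r ++ ["   "]),
        map_enum_map
          (fun i r => if PySem.Int.mod i 2 = 0 then pvRightCol g i r ++ ["───"]
            else pvRightCol g i r ++ ["   "])
          (fun i r => if g * 2 - 1 ≠ g * 2 - 2 then pvJunction g i r else r)]
    · simp only [h2, if_false, if_true]
  · by_cases h2 : PySem.Int.mod k 2 = 0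
    · simp only [h1, h2, if_false, if_true]
      rw [map_enum_map
          (fun i r => if PySem.Int.mod i 2 = 0 then r ++ ["───"] else r ++ ["   "])
          (fun i r => if k ≠ g * 2 - 2 then pvJunction g i r else r)]
    · simp only [h1, h2, if_false]
      simp [PySem.List.map_snd_enumerate]

theorem enumerate_replicate {β : Type} (a : β) :
    ∀ (n : Nat) (s : Int),
      PySem.List.enumerate (List.replicate n a) s
        = (List.range n).map (fun j : Nat => (s + (j : Int), a)) := by
  intro n
  induction n with
  | zero => intro s; rfl
  | succ m ih =>
      intro s
      rw [List.replicate_succ, PySem.List.enumerate_cons, ih, List.range_succ_eq_map,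
        List.map_cons, List.map_map]
      refine List.cons_eq_cons.mpr ⟨by simp, ?_⟩
      apply List.map_congr_left
      intro j _
      simp only [Function.comp_apply]
      congr 1
      push_cast
      ring

-- join with empty separator peels off the head
theorem joinEmpty_cons (a : String) (l : List String) :
    PySem.Str.join "" (a :: l) = a ++ PySem.Str.join "" l := by
  apply String.toList_inj.mp
  cases l with
  | nil => simp [PySem.Str.toList_join, PySem.Chars.join_singleton, PySem.Chars.join_nil]
  | cons b t =>
      simp [PySem.Str.toList_join]
      rw [PySem.Chars.join_cons_cons]
      simp

-- the core row invariant: folding pvRowStep over the last d cells appends pvSfx d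
theorem row_fold (m : Nat) (i : Int) :
    ∀ (d : Nat), d ≤ m → ∀ (row : List String),
      (PySem.List.pyRange (2 * (m : Int) - 2 * (d : Int)) (2 * (m : Int)) 1).foldl
          (fun r k => pvRowStep (m : Int) i r k) row
        = row ++ pvSfx (pvPiece i) (pvJuncChar (m : Int) i) (pvRightChar (m : Int) i) d := by
  intro d
  induction d with
  | zero =>
      intro _ row
      rw [PySem.List.pyRange_one_eq_nil (by omega)]
      simp [pvSfx]
  | succ d ih =>
      intro hdm row
      rw [PySem.List.pyRange_one_cons (by push_cast; omega),
        PySem.List.pyRange_one_cons (by push_cast; omega)]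
      simp only [List.foldl_cons]
      cases d with
      | zero =>
          -- last cell: k appends the piece only, k + 1 appends the right-side char
          rw [PySem.List.pyRange_one_eq_nil (by push_cast; omega)]
          simp only [List.foldl_nil]
          unfold pvRowStep pvPiece
          split_ifs <;>
            first
              | (simp [pvRightCol_eq, pvSfx, List.append_assoc]; done)
              | (exfalso;
                 simp only [ne_eq, PySem.Int.mod_eq_zero_iff_dvd, not_not] at *;
                 push_cast at *; omega)
      | succ e =>
          -- interior cell: k appends piece and junction, k + 1 does nothing
          rw [show (2 * (m : Int) - 2 * ((e + 1 + 1 : Nat) : Int) + 1 + 1)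
              = 2 * (m : Int) - 2 * ((e + 1 : Nat) : Int) from by push_cast; ring,
            ih (by omega)]
          unfold pvRowStep pvPiece
          split_ifs <;>
            first
              | (simp [pvJunction_eq, pvSfx, List.append_assoc]; done)
              | (exfalso;
                 simp only [ne_eq, PySem.Int.mod_eq_zero_iff_dvd, not_not] at *;
                 push_cast at *; omega)

-- joining pvSfx with "" gives piece + (junc + piece)^(d-1) + right
theorem sfx_join (p j r : String) :
    ∀ (d : Nat), PySem.Str.join "" (pvSfx p j r (d + 1)) = p ++ pvRepeat (j ++ p) d ++ r := by
  intro d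
  induction d with
  | zero =>
      rw [show pvSfx p j r 1 = [p, r] from rfl, joinEmpty_cons, joinEmpty_cons]
      apply String.toList_inj.mp
      simp [PySem.Str.toList_join, PySem.Chars.join_nil, pvRepeat]
  | succ e ih =>
      rw [show pvSfx p j r (e + 1 + 1) = p :: j :: pvSfx p j r (e + 1) from rfl,
        joinEmpty_cons, joinEmpty_cons, ih]
      apply String.toList_inj.mp
      simp [pvRepeat]

-- the content tail [p, r, p, r, …] (p = "   ", r = "│") joins to ("   │")^d
theorem sfx_join_content :
    ∀ (d : Nat), PySem.Str.join "" (pvSfx "   " "│" "│" d) = pvRepeat "   │" d := by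
  intro d
  induction d with
  | zero => rfl
  | succ e ih =>
      cases e with
      | zero => rfl
      | succ f =>
          rw [show pvSfx "   " "│" "│" (f + 1 + 1) = "   " :: "│" :: pvSfx "   " "│" "│" (f + 1)
            from rfl, joinEmpty_cons, joinEmpty_cons, ih]
          apply String.toList_inj.mp
          simp [pvRepeat]

-- per-row equality: A's finished row i joins to B's line i   (0 ≤ i ≤ 2m)
theorem line_eq (m : Nat) (i : Int) (h0 : 0 ≤ i) (h2 : i ≤ 2 * (m : Int)) :
    PySem.Str.join ""
        ((PySem.List.pyRange 0 ((m : Int) * 2) 1).foldl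
          (fun r k => pvRowStep (m : Int) i r k) (pvFirstCol (m : Int) i []))
      = pvLine (m : Int) i := by
  have hrange : PySem.List.pyRange 0 ((m : Int) * 2) 1
      = PySem.List.pyRange (2 * (m : Int) - 2 * m) (2 * (m : Int)) 1 := by
    congr 1
    · ring
    · ring
  rw [hrange, row_fold m i m (le_refl m), pvFirstCol_eq]
  have hmod : PySem.Int.mod i 2 = 0 ∨ PySem.Int.mod i 2 = 1 := by
    rcases PySem.Int.mod_two_eq i with h | h
    · exact Or.inl h
    · exact Or.inr h
  cases m with
  | zero =>
      -- single row: i = 0, no cells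
      have : i = 0 := by omega
      subst this
      rfl
  | succ e =>
      rw [List.nil_append, List.singleton_append, joinEmpty_cons]
      have hn0 : ¬ ((e + 1 : Nat) : Int) = 0 := by push_cast; omega
      rcases hmod with hev | hod
      · -- border row: i is even
        have hi1 : ¬ PySem.Int.mod i 2 = 1 := by rw [hev]; decide
        unfold pvLine pvLeftChar pvJuncChar pvRightChar pvPiece pvBorder
        rw [if_neg hi1, if_neg hn0, if_neg hn0, if_neg hn0,
          show ((((e + 1 : Nat) : Int) - 1).toNat) = e from by push_cast; omega]
        by_cases hi0 : i = 0
        · rw [if_pos hi0, if_pos hi0, if_pos hi0, if_pos hi0, if_pos hev, sfx_join,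
            show "┬" ++ "───" = "┬───" from by decide]
          apply String.toList_inj.mp
          simp
        · have hdvd : (2 : Int) ∣ i := (PySem.Int.mod_eq_zero_iff_dvd i 2).mp hev
          by_cases hig : i = 2 * ((e + 1 : Nat) : Int)
          · have hgA : i = ((e + 1 : Nat) : Int) * 2 := by omega
            rw [if_neg hi0, if_neg hi0, if_neg hi0, if_neg hi0, if_pos hgA, if_pos hgA,
              if_pos hgA, if_pos hig, if_pos hev, sfx_join,
              show "┴" ++ "───" = "┴───" from by decide]
            apply String.toList_inj.mp
            simp
          · have hgA : ¬ i = ((e + 1 : Nat) : Int) * 2 := by omega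
            rw [if_neg hi0, if_neg hi0, if_neg hi0, if_neg hi0, if_neg hgA, if_neg hgA,
              if_neg hgA, if_neg hig, if_pos hev, if_pos hev, if_pos hev, if_pos hev,
              sfx_join, show "┼" ++ "───" = "┼───" from by decide]
            apply String.toList_inj.mp
            simp
      · -- content row: i is odd
        have hndvd : ¬ (2 : Int) ∣ i := by
          intro hd
          rw [(PySem.Int.mod_eq_zero_iff_dvd i 2).mpr hd] at hod
          exact absurd hod (by decide)
        have hi0 : ¬ i = 0 := by omega
        have hig : ¬ i = 2 * ((e + 1 : Nat) : Int) := by push_cast; omega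
        have hgA : ¬ i = ((e + 1 : Nat) : Int) * 2 := by push_cast; omega
        have hev : ¬ PySem.Int.mod i 2 = 0 := by rw [hod]; decide
        unfold pvLine pvLeftChar pvJuncChar pvRightChar pvPiece
        rw [if_pos hod, if_neg hi0, if_neg hi0, if_neg hi0, if_neg hgA, if_neg hgA,
          if_neg hgA, if_neg hev, if_neg hev, if_neg hev, if_neg hev, sfx_join_content,
          show (((e + 1 : Nat) : Int)).toNat = e + 1 from by push_cast; omega]

-- ===== VERDICT (by name: the statement is the Claim_ definition above) =====
theorem grid_maker_spec : Claim_equal_grid_maker := by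
  intro g _
  unfold Spec_grid_maker
  simp only [grid_maker, grid_maker_alt]
  by_cases hneg : g < 0
  · -- negative side length: both grids are empty
    rw [show (g * 2 + 1).toNat = 0 from by omega,
      PySem.List.pyRange_one_eq_nil (show g * 2 ≤ 0 by omega),
      PySem.List.pyRange_one_eq_nil (show 2 * g + 1 ≤ 0 by omega)]
    rfl
  · obtain ⟨m, hm⟩ : ∃ m : Nat, g = (m : Int) := ⟨g.toNat, by omega⟩
    subst hm
    -- A: reduce to a map of per-row folds over the row indices
    have hstep : ∀ (rows : List (List String)) (l : List Int),
        l.foldl (pvStep (m : Int)) rows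
          = l.foldl (fun rs k => (PySem.List.enumerate rs 0).map
              (fun p => pvRowStep (m : Int) p.1 p.2 k)) rows := by
      intro rows l
      apply PySem.List.foldl_congr_mem
      intro acc x _
      exact pvStep_eq (m : Int) acc x
    rw [hstep, foldl_enum_map (fun i row k => pvRowStep (m : Int) i row k),
      enum_map (fun i r => pvFirstCol (m : Int) i r),
      show ((m : Int) * 2 + 1).toNat = 2 * m + 1 from by omega,
      enumerate_replicate ([] : List String) (2 * m + 1) 0, List.map_map, List.map_map,
      List.map_map, PySem.List.foldl_append_singleton_eq_map, List.nil_append,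
      show (2 * (m : Int) + 1) = ((2 * m + 1 : Nat) : Int) from by push_cast; ring,
      PySem.List.pyRange_zero_natCast (2 * m + 1), List.map_map]
    congr 1
    apply List.map_congr_left
    intro j hj
    rw [List.mem_range] at hj
    simp only [Function.comp_apply, zero_add]
    exact line_eq m (j : Int) (by omega) (by omega)
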